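-- pv_equiv track=rewrite | github.com/debricked/soot-wrapper | javascript/src/gen_package_cg.py | remove_unreachable
-- ===== SOURCE A (Python) =====
-- def remove_unreachable(starting_nodes, cg):
--     """ remove_unreachable takes a call graph and starting nodes and filters
--         out the nodes that aren't reachable from the starting nodes
--
--     Paramater:
--     starting_nodes (list[string]): the starting nodes in the traversal
--     cg (dict): The call graph to be "cleaned"
--
--     Returns:
--     dict, the cleaned call graph
--     """
--
--     starting_nodes = [x for x in starting_nodes if x in cg]
--     clean_cg = {}
--     vis = set()
--     vis.union(starting_nodes)
--     que = starting_nodes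
--     ind = 0
--
--     while ind < len(que):
--         curr = que[ind]
--         if curr in cg:
--             clean_cg[curr] = cg[curr]
--             for neigh in cg[curr]:
--                 if neigh not in vis:
--                     vis.add(neigh)
--                     que.append(neigh)
--         ind += 1
--     return clean_cg
-- ===== SOURCE B (Python) =====
-- def remove_unreachable(starting_nodes, cg):
--     """Two-phase rewrite: (1) find the reachable cg keys with a BFS whose
--     visited set is properly seeded with the starting nodes, (2) build the
--     filtered graph in one comprehension (values are the same cg[n] objects)."""
--     seen = set()
--     queue = []
--     for x in starting_nodes:
--         if x in cg and x not in seen: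
--             seen.add(x)
--             queue.append(x)
--     order = []
--     while queue:
--         curr = queue.pop(0)
--         order.append(curr)
--         for neigh in cg[curr]:
--             if neigh in cg and neigh not in seen:
--                 seen.add(neigh)
--                 queue.append(neigh)
--     return {n: cg[n] for n in order}
-- ===== Notes on version B (the rewrite author's own statement) =====
-- stated objective: alternative
-- what changed: B separates reachability discovery (a BFS worklist whose visited set is seeded with the starting nodes, so no node is ever enqueued or processed twice) from graph construction (one dict comprehension over the visit order), whereas A leaves the visited set unseeded, re-enqueues duplicates, and builds the cleaned dict inside the frontier loop.
import Mathlib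
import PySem

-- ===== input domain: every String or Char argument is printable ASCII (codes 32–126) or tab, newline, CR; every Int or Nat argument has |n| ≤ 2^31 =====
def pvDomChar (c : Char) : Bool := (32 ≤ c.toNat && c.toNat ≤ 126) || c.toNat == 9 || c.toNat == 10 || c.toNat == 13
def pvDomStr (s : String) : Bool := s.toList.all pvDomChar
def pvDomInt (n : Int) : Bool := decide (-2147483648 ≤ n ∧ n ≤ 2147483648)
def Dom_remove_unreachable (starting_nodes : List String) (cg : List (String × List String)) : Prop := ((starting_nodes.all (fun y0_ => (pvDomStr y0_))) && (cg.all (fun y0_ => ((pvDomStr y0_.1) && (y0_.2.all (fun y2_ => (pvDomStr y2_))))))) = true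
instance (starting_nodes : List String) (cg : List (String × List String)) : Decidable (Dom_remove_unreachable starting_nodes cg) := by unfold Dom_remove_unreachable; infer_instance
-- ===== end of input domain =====

-- B splits the task into reachability discovery (BFS with a visited set seeded with the
-- starting nodes, so nothing is enqueued twice) followed by one comprehension that builds
-- the filtered graph; A builds the dict inside the frontier loop with an unseeded visited set.


-- ===== PORT A =====

-- `for neigh in cg[curr]: if neigh not in vis: vis.add(neigh); que.append(neigh)`
def pvAExpand : PySem.Set String × List String → List String → PySem.Set String × List String
  | p, [] => p
  | (vis, que), n :: rest =>
      if PySem.Set.contains vis n then pvAExpand (vis, que) rest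
      else pvAExpand (PySem.Set.add vis n, que ++ [n]) rest

-- visited-counting measure used only for termination of the two BFS loops
def pvCF (u : List String) (vis : PySem.Set String) : Nat :=
  (u.dedup.filter (fun y => !(PySem.Set.contains vis y))).length

lemma pvCF_add (u : List String) (vis : PySem.Set String) (x : String)
    (hx : x ∈ u) (hnx : ¬ x ∈ vis) :
    pvCF u (PySem.Set.add vis x) + 1 = pvCF u vis := by
  unfold pvCF
  rw [PySem.Set.add_of_not_mem hnx]
  have hc : ∀ y, (!(PySem.Set.contains (vis ++ [x]) y)) = (!(PySem.Set.contains vis y) && !(y == x)) := by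
    intro y
    rw [show (PySem.Set.contains (vis ++ [x]) y) = (PySem.Set.contains vis y || (y == x)) by
      rw [Bool.eq_iff_iff]; simp]
    rw [Bool.not_or]
  simp only [hc]
  rw [show (fun y => !PySem.Set.contains vis y && !(y == x)) = fun y => (!(y==x)) && (!PySem.Set.contains vis y) from funext (by intro y; rw [Bool.and_comm]), ← List.filter_filter]
  have hnd : (u.dedup.filter (fun y => !(PySem.Set.contains vis y))).Nodup :=
    (List.nodup_dedup u).filter _
  have hmem : x ∈ u.dedup.filter (fun y => !(PySem.Set.contains vis y)) := by
    rw [List.mem_filter]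
    refine ⟨List.mem_dedup.2 hx, ?_⟩
    simpa using hnx
  have e : (u.dedup.filter (fun y => !(PySem.Set.contains vis y))).filter (fun y => !(y == x))
      = (u.dedup.filter (fun y => !(PySem.Set.contains vis y))).erase x := by
    rw [List.Nodup.erase_eq_filter hnd]; rfl
  rw [e, List.length_erase_of_mem hmem]
  have : 1 ≤ (u.dedup.filter (fun y => !(PySem.Set.contains vis y))).length := List.length_pos_of_mem hmem
  omega

lemma pvAExpand_measure (u : List String) (vs : List String) :
    ∀ (vis : PySem.Set String) (que : List String), (∀ x ∈ vs, x ∈ u) →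
    pvCF u (pvAExpand (vis, que) vs).1 + (pvAExpand (vis, que) vs).2.length
      ≤ pvCF u vis + que.length
    ∧ que.length ≤ (pvAExpand (vis, que) vs).2.length := by
  induction vs with
  | nil => intro vis que _; simp [pvAExpand]
  | cons n rest ih =>
    intro vis que hvs
    rw [pvAExpand]
    by_cases hn : PySem.Set.contains vis n
    · rw [if_pos hn]
      exact ih vis que (fun x hx => hvs x (List.mem_cons_of_mem _ hx))
    · rw [if_neg hn]
      have hfresh : ¬ n ∈ vis := by
        intro h; exact hn ((PySem.Set.contains_iff _ _).2 h)
      have hcf := pvCF_add u vis n (hvs n (List.mem_cons_self ..)) hfresh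
      have := ih (PySem.Set.add vis n) (que ++ [n]) (fun x hx => hvs x (List.mem_cons_of_mem _ hx))
      simp only [List.length_append, List.length_cons, List.length_nil] at this ⊢
      omega

-- the `while ind < len(que)` loop of A
def pvALoop (cg : List (String × List String)) (clean : PySem.Dict String (List String))
    (vis : PySem.Set String) (que : List String) (ind : Nat) :
    PySem.Dict String (List String) :=
  if h : ind < que.length then
    match hg : (PySem.Dict.mk cg).get? que[ind] with
    | some vs =>
        let p := pvAExpand (vis, que) vs
        pvALoop cg (clean.insert que[ind] vs) p.1 p.2 (ind + 1)
    | none => pvALoop cg clean vis que (ind + 1)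
  else clean
termination_by pvCF ((cg.map Prod.snd).flatten) vis + que.length - ind
decreasing_by
  · have hmem : (que[ind], vs) ∈ (PySem.Dict.mk cg).items :=
      PySem.Dict.mem_items_of_get?_eq_some _ hg
    have hvs : ∀ x ∈ vs, x ∈ (cg.map Prod.snd).flatten := by
      intro x hxv
      have : vs ∈ cg.map Prod.snd := by
        simpa using List.mem_map_of_mem (f := Prod.snd) hmem
      exact List.mem_flatten.2 ⟨vs, this, hxv⟩
    have := pvAExpand_measure ((cg.map Prod.snd).flatten) vs vis que hvs
    omega
  · omega

def remove_unreachable (starting_nodes : List String) (cg : List (String × List String)) :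
    List (String × List String) :=
  -- starting_nodes = [x for x in starting_nodes if x in cg]
  -- vis = set(); vis.union(starting_nodes) discards its result — a no-op
  (pvALoop cg PySem.Dict.empty PySem.Set.empty
    (starting_nodes.filter (fun x => (PySem.Dict.mk cg).contains x)) 0).items

-- ===== PORT B =====

-- the loop body `if x in cg and x not in seen: seen.add(x); queue.append(x)`
-- (Source B uses it twice: once seeding from starting_nodes, once over cg[curr])
def pvBExpand (cg : List (String × List String)) :
    PySem.Set String × List String → List String → PySem.Set String × List String
  | p, [] => p
  | (seen, queue), n :: rest =>
      if (PySem.Dict.mk cg).contains n && !(PySem.Set.contains seen n) then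
        pvBExpand cg (PySem.Set.add seen n, queue ++ [n]) rest
      else pvBExpand cg (seen, queue) rest

lemma pvBExpand_measure (cg : List (String × List String)) (vs : List String) :
    ∀ (seen : PySem.Set String) (queue : List String),
    pvCF (cg.map Prod.fst) (pvBExpand cg (seen, queue) vs).1
        + (pvBExpand cg (seen, queue) vs).2.length
      ≤ pvCF (cg.map Prod.fst) seen + queue.length := by
  induction vs with
  | nil => intro seen queue; simp [pvBExpand]
  | cons n rest ih =>
    intro seen queue
    rw [pvBExpand]
    by_cases hn : ((PySem.Dict.mk cg).contains n && !(PySem.Set.contains seen n)) = true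
    · rw [if_pos hn]
      rw [Bool.and_eq_true, Bool.not_eq_true'] at hn
      have hk : n ∈ cg.map Prod.fst := by
        have := (PySem.Dict.contains_iff_mem_keys _ _).1 hn.1
        simpa [PySem.Dict.keys] using this
      have hfresh : ¬ n ∈ seen := by
        intro h
        rw [(PySem.Set.contains_iff _ _).2 h] at hn
        exact absurd hn.2 (by simp)
      have hcf := pvCF_add (cg.map Prod.fst) seen n hk hfresh
      have := ih (PySem.Set.add seen n) (queue ++ [n])
      simp only [List.length_append, List.length_cons, List.length_nil] at this ⊢
      omega
    · rw [if_neg hn]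
      exact ih seen queue

-- the `while queue:` loop of B (curr = queue.pop(0); order.append(curr); expand cg[curr])
def pvBLoop (cg : List (String × List String)) (seen : PySem.Set String)
    (queue : List String) (order : List String) : List String :=
  match queue with
  | [] => order
  | curr :: rest =>
      -- curr is always a key of cg here, so cg[curr] cannot raise
      let p := pvBExpand cg (seen, rest) (((PySem.Dict.mk cg).get? curr).getD [])
      pvBLoop cg p.1 p.2 (order ++ [curr])
termination_by pvCF (cg.map Prod.fst) seen + queue.length
decreasing_by
  have := pvBExpand_measure cg (((PySem.Dict.mk cg).get? curr).getD []) seen rest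
  simp only [List.length_cons]
  omega

def remove_unreachable_alt (starting_nodes : List String) (cg : List (String × List String)) :
    List (String × List String) :=
  let p := pvBExpand cg (PySem.Set.empty, []) starting_nodes
  let order := pvBLoop cg p.1 p.2 []
  -- {n: cg[n] for n in order}; every n in order is a key of cg
  (order.foldl (fun d n => d.insert n (((PySem.Dict.mk cg).get? n).getD []))
    PySem.Dict.empty).items

-- ===== PRECONDITION & SPEC =====
def Spec_remove_unreachable (starting_nodes : List String) (cg : List (String × List String)) (out : List (String × List String)) : Prop := out = remove_unreachable_alt starting_nodes cg
instance (starting_nodes : List String) (cg : List (String × List String)) (out : List (String × List String)) : Decidable (Spec_remove_unreachable starting_nodes cg out) := by unfold Spec_remove_unreachable; infer_instance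

-- ===== CLAIM (what is proved, stated in full; the proofs are below) =====
def Claim_equal_remove_unreachable : Prop := ∀ (starting_nodes : List String) (cg : List (String × List String)), Dom_remove_unreachable starting_nodes cg → Spec_remove_unreachable starting_nodes cg (remove_unreachable starting_nodes cg)

-- ===== LEMMAS AND PROOFS =====

-- key test `x in cg` and value lookup `cg[x]`
def pvKb (cg : List (String × List String)) (x : String) : Bool :=
  (PySem.Dict.mk cg).contains x
def pvV (cg : List (String × List String)) (x : String) : List String :=
  ((PySem.Dict.mk cg).get? x).getD []

-- the fresh nodes A appends to its queue while expanding vs against visited set vis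
def pvNew : PySem.Set String → List String → List String
  | _, [] => []
  | vis, n :: rest =>
      if PySem.Set.contains vis n then pvNew vis rest
      else n :: pvNew (PySem.Set.add vis n) rest

-- the fresh in-cg nodes B appends to its queue
def pvBNew (cg : List (String × List String)) : PySem.Set String → List String → List String
  | _, [] => []
  | seen, n :: rest =>
      if pvKb cg n && !(PySem.Set.contains seen n) then n :: pvBNew cg (PySem.Set.add seen n) rest
      else pvBNew cg (seen, rest).1 rest

-- B's queue as a function of A's remaining queue: keep the first occurrence of each
-- cg-key that is not in excl (the nodes already output)
def pvQ (cg : List (String × List String)) : List String → List String → List String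
  | [], _ => []
  | x :: rest, excl =>
      if pvKb cg x && !(excl.contains x) then x :: pvQ cg rest (excl ++ [x])
      else pvQ cg rest excl


-- ---- characterizations of the two inner loops ----

lemma pvAExpand_spec (vs : List String) : ∀ (vis : PySem.Set String) (que : List String),
    pvAExpand (vis, que) vs = (PySem.Set.update vis vs, que ++ pvNew vis vs) := by
  induction vs with
  | nil => intro vis que; simp [pvAExpand, pvNew, PySem.Set.update]
  | cons n rest ih =>
    intro vis que
    rw [pvAExpand, pvNew]
    by_cases hn : PySem.Set.contains vis n
    · rw [if_pos hn, if_pos hn, ih, PySem.Set.update_cons,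
        PySem.Set.add_of_mem ((PySem.Set.contains_iff _ _).1 hn)]
    · rw [if_neg hn, if_neg hn, ih, PySem.Set.update_cons]
      simp

lemma pvBExpand_spec (cg : List (String × List String)) (vs : List String) :
    ∀ (seen : PySem.Set String) (queue : List String),
    pvBExpand cg (seen, queue) vs
      = (PySem.Set.update seen (vs.filter (pvKb cg)), queue ++ pvBNew cg seen vs) := by
  induction vs with
  | nil => intro seen queue; simp [pvBExpand, pvBNew, PySem.Set.update]
  | cons n rest ih =>
    intro seen queue
    rw [pvBExpand, pvBNew, List.filter_cons]
    by_cases hk : pvKb cg n = true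
    · have hk' : (PySem.Dict.mk cg).contains n = true := hk
      by_cases hs : n ∈ seen
      · rw [show ((PySem.Dict.mk cg).contains n && !(PySem.Set.contains seen n)) = false by
            simp [hk', hs],
          show (pvKb cg n && !(PySem.Set.contains seen n)) = false by simp [hk, hs]]
        simp only [Bool.false_eq_true, if_false, if_pos hk]
        rw [ih, PySem.Set.update_cons, PySem.Set.add_of_mem hs]
      · rw [show ((PySem.Dict.mk cg).contains n && !(PySem.Set.contains seen n)) = true by
            simp [hk', hs],
          show (pvKb cg n && !(PySem.Set.contains seen n)) = true by simp [hk, hs]]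
        simp only [if_true, if_pos hk]
        rw [ih, PySem.Set.update_cons]
        simp
    · have hk2 : pvKb cg n = false := Bool.eq_false_iff.2 hk
      have hk' : (PySem.Dict.mk cg).contains n = false := hk2
      rw [show ((PySem.Dict.mk cg).contains n && !(PySem.Set.contains seen n)) = false by
          simp [hk'],
        show (pvKb cg n && !(PySem.Set.contains seen n)) = false by simp [hk2]]
      simp only [Bool.false_eq_true, if_false, if_neg hk]
      exact ih seen queue

lemma pvNew_mem (vs : List String) : ∀ (vis : PySem.Set String) (x : String),
    x ∈ pvNew vis vs → x ∈ vs ∧ ¬ x ∈ vis := by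
  induction vs with
  | nil => intro vis x h; simp [pvNew] at h
  | cons n rest ih =>
    intro vis x h
    rw [pvNew] at h
    by_cases hn : PySem.Set.contains vis n
    · rw [if_pos hn] at h
      have := ih vis x h
      exact ⟨List.mem_cons_of_mem _ this.1, this.2⟩
    · rw [if_neg hn] at h
      rcases List.mem_cons.1 h with rfl | h2
      · exact ⟨List.mem_cons_self .., fun hc => hn ((PySem.Set.contains_iff _ _).2 hc)⟩
      · have := ih (PySem.Set.add vis n) x h2
        refine ⟨List.mem_cons_of_mem _ this.1, fun hc => this.2 ?_⟩
        exact (PySem.Set.mem_add _ _ _).2 (Or.inl hc)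

lemma pvNew_nodup (vs : List String) : ∀ (vis : PySem.Set String), (pvNew vis vs).Nodup := by
  induction vs with
  | nil => intro vis; simp [pvNew]
  | cons n rest ih =>
    intro vis
    rw [pvNew]
    by_cases hn : PySem.Set.contains vis n
    · rw [if_pos hn]; exact ih vis
    · rw [if_neg hn]
      refine List.nodup_cons.2 ⟨fun hc => ?_, ih _⟩
      have := (pvNew_mem rest _ n hc).2
      exact this ((PySem.Set.mem_add _ _ _).2 (Or.inr rfl))

lemma pvNew_nil_of_subset (vs : List String) (vis : PySem.Set String)
    (h : ∀ n ∈ vs, n ∈ vis) : pvNew vis vs = [] := by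
  induction vs with
  | nil => rfl
  | cons n rest ih =>
    rw [pvNew, if_pos ((PySem.Set.contains_iff _ _).2 (h n (List.mem_cons_self ..)))]
    exact ih (fun m hm => h m (List.mem_cons_of_mem _ hm))

lemma pvUpdate_of_subset (vs : List String) : ∀ (vis : PySem.Set String),
    (∀ n ∈ vs, n ∈ vis) → PySem.Set.update vis vs = vis := by
  induction vs with
  | nil => intro vis _; rfl
  | cons n rest ih =>
    intro vis h
    rw [PySem.Set.update_cons, PySem.Set.add_of_mem (h n (List.mem_cons_self ..))]
    exact ih vis (fun m hm => h m (List.mem_cons_of_mem _ hm))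


lemma pvBNew_mem (cg : List (String × List String)) (vs : List String) :
    ∀ (seen : PySem.Set String) (x : String), x ∈ pvBNew cg seen vs →
    pvKb cg x = true ∧ ¬ x ∈ seen ∧ x ∈ vs := by
  induction vs with
  | nil => intro seen x h; simp [pvBNew] at h
  | cons n rest ih =>
    intro seen x h
    rw [pvBNew] at h
    by_cases hc : (pvKb cg n && !(PySem.Set.contains seen n)) = true
    · rw [if_pos hc] at h
      rw [Bool.and_eq_true, Bool.not_eq_true'] at hc
      rcases List.mem_cons.1 h with rfl | h2
      · refine ⟨hc.1, fun hm => ?_, List.mem_cons_self ..⟩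
        rw [(PySem.Set.contains_iff _ _).2 hm] at hc
        simpa using hc.2
      · have := ih (PySem.Set.add seen n) x h2
        exact ⟨this.1, fun hm => this.2.1 ((PySem.Set.mem_add _ _ _).2 (Or.inl hm)),
          List.mem_cons_of_mem _ this.2.2⟩
    · rw [if_neg hc] at h
      have := ih seen x h
      exact ⟨this.1, this.2.1, List.mem_cons_of_mem _ this.2.2⟩

lemma pvBNew_nodup (cg : List (String × List String)) (vs : List String) :
    ∀ (seen : PySem.Set String), (pvBNew cg seen vs).Nodup := by
  induction vs with
  | nil => intro seen; simp [pvBNew]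
  | cons n rest ih =>
    intro seen
    rw [pvBNew]
    by_cases hc : (pvKb cg n && !(PySem.Set.contains seen n)) = true
    · rw [if_pos hc]
      refine List.nodup_cons.2 ⟨fun hmem => ?_, ih _⟩
      exact (pvBNew_mem cg rest _ n hmem).2.1 ((PySem.Set.mem_add _ _ _).2 (Or.inr rfl))
    · rw [if_neg hc]; exact ih seen

lemma pvInner (cg : List (String × List String)) (que : List String) (vs : List String) :
    ∀ (vis seen : PySem.Set String),
    (∀ x, x ∈ seen ↔ pvKb cg x = true ∧ (x ∈ vis ∨ x ∈ que)) →
    pvBNew cg seen vs = (pvNew vis vs).filter (fun x => pvKb cg x && !(que.contains x)) := by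
  induction vs with
  | nil => intro vis seen _; simp [pvBNew, pvNew]
  | cons n rest ih =>
    intro vis seen H
    rw [pvBNew, pvNew]
    by_cases hv : n ∈ vis
    · rw [if_pos ((PySem.Set.contains_iff _ _).2 hv)]
      have hdrop : (pvKb cg n && !(PySem.Set.contains seen n)) = false := by
        by_cases hk : pvKb cg n = true
        · have hmem : n ∈ seen := (H n).2 ⟨hk, Or.inl hv⟩
          simp [hmem]
        · simp [Bool.eq_false_iff.2 hk]
      simp only [hdrop, Bool.false_eq_true, if_false]
      exact ih vis seen H
    · rw [if_neg (fun hc => hv ((PySem.Set.contains_iff _ _).1 hc)), List.filter_cons]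
      by_cases hk : pvKb cg n = true
      · by_cases hq : n ∈ que
        · have hmem : n ∈ seen := (H n).2 ⟨hk, Or.inr hq⟩
          have h1 : (pvKb cg n && !(PySem.Set.contains seen n)) = false := by simp [hmem]
          have h2 : (pvKb cg n && !(que.contains n)) = false := by simp [hq]
          simp only [h1, h2, Bool.false_eq_true, if_false]
          refine ih (PySem.Set.add vis n) seen ?_
          intro x
          rw [H x, PySem.Set.mem_add]
          by_cases hxn : x = n
          · subst hxn; simp [hk, hq]
          · simp [hxn]
        · have hseen : ¬ n ∈ seen := by
            intro hm
            rcases (H n).1 hm with ⟨_, h2 | h2⟩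
            · exact hv h2
            · exact hq h2
          have h1 : (pvKb cg n && !(PySem.Set.contains seen n)) = true := by simp [hk, hseen]
          have h2 : (pvKb cg n && !(que.contains n)) = true := by simp [hk, hq]
          simp only [h1, h2, if_true]
          congr 1
          refine ih (PySem.Set.add vis n) (PySem.Set.add seen n) ?_
          intro x
          rw [PySem.Set.mem_add, PySem.Set.mem_add, H x]
          by_cases hxn : x = n
          · subst hxn; simp [hk]
          · simp [hxn]
      · have hk2 : pvKb cg n = false := Bool.eq_false_iff.2 hk
        have h1 : (pvKb cg n && !(PySem.Set.contains seen n)) = false := by simp [hk2]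
        have h2 : (pvKb cg n && !(que.contains n)) = false := by simp [hk2]
        simp only [h1, h2, Bool.false_eq_true, if_false]
        refine ih (PySem.Set.add vis n) seen ?_
        intro x
        rw [H x, PySem.Set.mem_add]
        by_cases hxn : x = n
        · subst hxn; simp [hk2]
        · simp [hxn]


lemma pvQ_append (cg : List (String × List String)) (u : List String) :
    ∀ (v : List String) (excl : List String),
    pvQ cg (u ++ v) excl = pvQ cg u excl ++ pvQ cg v (excl ++ pvQ cg u excl) := by
  induction u with
  | nil => intro v excl; simp [pvQ]
  | cons x rest ih =>
    intro v excl
    rw [List.cons_append, pvQ, pvQ]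
    by_cases hc : (pvKb cg x && !(excl.contains x)) = true
    · simp only [hc, if_true]
      rw [List.cons_append, ih]
      simp [List.append_assoc]
    · have hc2 := Bool.eq_false_iff.2 hc
      simp only [hc2, Bool.false_eq_true, if_false]
      exact ih v excl

lemma pvQ_mem (cg : List (String × List String)) (l : List String) :
    ∀ (excl : List String) (x : String),
    x ∈ pvQ cg l excl ↔ x ∈ l ∧ pvKb cg x = true ∧ ¬ x ∈ excl := by
  induction l with
  | nil => intro excl x; simp [pvQ]
  | cons y rest ih =>
    intro excl x
    rw [pvQ]
    by_cases hk : pvKb cg y = true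
    · by_cases he : y ∈ excl
      · rw [if_neg (by simp [he])]
        rw [ih]
        constructor
        · rintro ⟨h1, h2, h3⟩; exact ⟨List.mem_cons_of_mem _ h1, h2, h3⟩
        · rintro ⟨h1, h2, h3⟩
          rcases List.mem_cons.1 h1 with rfl | h1'
          · exact absurd he h3
          · exact ⟨h1', h2, h3⟩
      · rw [if_pos (by simp [hk, he]), List.mem_cons, ih]
        constructor
        · rintro (rfl | ⟨h1, h2, h3⟩)
          · exact ⟨List.mem_cons_self .., hk, he⟩
          · refine ⟨List.mem_cons_of_mem _ h1, h2, fun hm => h3 ?_⟩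
            simp [hm]
        · rintro ⟨h1, h2, h3⟩
          rcases List.mem_cons.1 h1 with rfl | h1'
          · exact Or.inl rfl
          · by_cases hxy : x = y
            · exact Or.inl hxy
            · refine Or.inr ⟨h1', h2, fun hm => ?_⟩
              rcases List.mem_append.1 hm with hm' | hm'
              · exact h3 hm'
              · exact hxy (by simpa using hm')
    · rw [if_neg (by simp [Bool.eq_false_iff.2 hk]), ih]
      constructor
      · rintro ⟨h1, h2, h3⟩; exact ⟨List.mem_cons_of_mem _ h1, h2, h3⟩
      · rintro ⟨h1, h2, h3⟩
        rcases List.mem_cons.1 h1 with rfl | h1'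
        · exact absurd h2 hk
        · exact ⟨h1', h2, h3⟩

lemma pvQ_nodup_eq_filter (cg : List (String × List String)) (l : List String) :
    ∀ (excl : List String), l.Nodup →
    pvQ cg l excl = l.filter (fun x => pvKb cg x && !(excl.contains x)) := by
  induction l with
  | nil => intro excl _; rfl
  | cons y rest ih =>
    intro excl hnd
    have hy : ¬ y ∈ rest := (List.nodup_cons.1 hnd).1
    rw [pvQ, List.filter_cons]
    by_cases hc : (pvKb cg y && !(excl.contains y)) = true
    · simp only [hc, if_true]
      congr 1
      rw [ih (excl ++ [y]) (List.nodup_cons.1 hnd).2]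
      refine List.filter_congr ?_
      intro x hx
      have hxy : ¬ x = y := fun h => hy (h ▸ hx)
      rw [show (excl ++ [y]).contains x = excl.contains x by
        rw [Bool.eq_iff_iff]; simp [hxy]]
    · simp only [hc, Bool.false_eq_true, if_false]
      exact ih excl (List.nodup_cons.1 hnd).2


lemma pvQ_filter_K (cg : List (String × List String)) (l : List String) :
    ∀ (excl : List String), pvQ cg (l.filter (fun x => pvKb cg x)) excl = pvQ cg l excl := by
  induction l with
  | nil => intro excl; rfl
  | cons y rest ih =>
    intro excl
    rw [List.filter_cons]
    by_cases hk : pvKb cg y = true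
    · simp only [hk, if_true]
      rw [pvQ, pvQ]
      by_cases he : (pvKb cg y && !(excl.contains y)) = true
      · simp only [he, if_true, ih]
      · simp only [he, Bool.false_eq_true, if_false, ih]
    · have hk2 := Bool.eq_false_iff.2 hk
      simp only [hk2, Bool.false_eq_true, if_false]
      rw [pvQ, show (pvKb cg y && !(excl.contains y)) = false by simp [hk2]]
      simp only [Bool.false_eq_true, if_false, ih]

lemma pvBNew_eq_pvQ (cg : List (String × List String)) (l : List String) :
    ∀ (seen : PySem.Set String) (excl : List String),
    (∀ x, x ∈ seen ↔ pvKb cg x = true ∧ x ∈ excl) →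
    pvBNew cg seen l = pvQ cg l excl := by
  induction l with
  | nil => intro _ _ _; rfl
  | cons n rest ih =>
    intro seen excl H
    rw [pvBNew, pvQ]
    by_cases hk : pvKb cg n = true
    · by_cases he : n ∈ excl
      · have hmem : n ∈ seen := (H n).2 ⟨hk, he⟩
        rw [show (pvKb cg n && !(PySem.Set.contains seen n)) = false by simp [hmem],
          show (pvKb cg n && !(excl.contains n)) = false by simp [he]]
        simp only [Bool.false_eq_true, if_false]
        exact ih seen excl H
      · have hmem : ¬ n ∈ seen := fun hm => he ((H n).1 hm).2
        rw [show (pvKb cg n && !(PySem.Set.contains seen n)) = true by simp [hk, hmem],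
          show (pvKb cg n && !(excl.contains n)) = true by simp [hk, he]]
        simp only [if_true]
        congr 1
        refine ih (PySem.Set.add seen n) (excl ++ [n]) ?_
        intro x
        rw [PySem.Set.mem_add, H x]
        by_cases hxn : x = n
        · subst hxn; simp [hk]
        · simp [hxn]
    · have hk2 := Bool.eq_false_iff.2 hk
      rw [show (pvKb cg n && !(PySem.Set.contains seen n)) = false by simp [hk2],
        show (pvKb cg n && !(excl.contains n)) = false by simp [hk2]]
      simp only [Bool.false_eq_true, if_false]
      exact ih seen excl H

lemma pvBLoop_nodup (cg : List (String × List String)) (seen : PySem.Set String)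
    (queue : List String) (order : List String) :
    (order ++ queue).Nodup → (∀ x ∈ order ++ queue, x ∈ seen) →
    (pvBLoop cg seen queue order).Nodup := by
  fun_induction pvBLoop cg seen queue order with
  | case1 seen order =>
    intro h1 _
    simpa using h1
  | case2 seen order curr rest p ih =>
    intro h1 h2
    have he : p = (PySem.Set.update seen ((((PySem.Dict.mk cg).get? curr).getD []).filter (pvKb cg)),
        rest ++ pvBNew cg seen (((PySem.Dict.mk cg).get? curr).getD [])) :=
      pvBExpand_spec cg _ seen rest
    set vs := ((PySem.Dict.mk cg).get? curr).getD [] with hvs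
    refine ih ?_ ?_
    · rw [he]
      have hre : order ++ [curr] ++ (rest ++ pvBNew cg seen vs)
          = (order ++ curr :: rest) ++ pvBNew cg seen vs := by
        simp [List.append_assoc]
      rw [hre, List.nodup_append]
      refine ⟨h1, pvBNew_nodup cg vs seen, ?_⟩
      intro x hx y hy
      rintro rfl
      exact (pvBNew_mem cg vs seen x hy).2.1 (h2 x hx)
    · rw [he]
      intro x hx
      simp only [List.append_assoc, List.mem_append, List.mem_cons] at hx
      rcases hx with hx | ((rfl | h0) | (hx | hx))
      · exact (PySem.Set.mem_update _ _ _).2 (Or.inl (h2 x (List.mem_append_left _ hx)))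
      · exact (PySem.Set.mem_update _ _ _).2
          (Or.inl (h2 x (List.mem_append_right _ (List.mem_cons_self ..))))
      · exact absurd h0 (List.not_mem_nil)
      · exact (PySem.Set.mem_update _ _ _).2
          (Or.inl (h2 x (List.mem_append_right _ (List.mem_cons_of_mem _ hx))))
      · have := pvBNew_mem cg vs seen x hx
        exact (PySem.Set.mem_update _ _ _).2 (Or.inr (List.mem_filter.2 ⟨this.2.2, this.1⟩))


lemma pvMain (cg : List (String × List String)) (clean : PySem.Dict String (List String))
    (vis : PySem.Set String) (que : List String) (ind : Nat) :
    ∀ (seen : PySem.Set String) (queue order : List String),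
    ind ≤ que.length →
    queue = pvQ cg (que.drop ind) order →
    clean.items = order.map (fun n => (n, pvV cg n)) →
    order.Nodup →
    (∀ x, x ∈ seen ↔ pvKb cg x = true ∧ (x ∈ vis ∨ x ∈ que)) →
    (∀ x ∈ order, ∀ n ∈ pvV cg x, n ∈ vis) →
    (∀ x ∈ que.take ind, pvKb cg x = true → x ∈ order) →
    (∀ x ∈ order, x ∈ que.take ind) →
    (pvALoop cg clean vis que ind).items
      = (pvBLoop cg seen queue order).map (fun n => (n, pvV cg n)) := by
  fun_induction pvALoop cg clean vis que ind with
  | case3 clean vis que ind h =>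
    intro seen queue order h0 hq hcl hnd H I4 I5 I7
    have hdrop : que.drop ind = [] := List.drop_eq_nil_of_le (by omega)
    rw [hdrop] at hq
    have hq' : queue = [] := hq
    subst hq'
    rw [pvBLoop]
    exact hcl
  | case2 clean vis que ind h hg ih =>
    intro seen queue order h0 hq hcl hnd H I4 I5 I7
    have hkb : pvKb cg (que[ind]) = false := by
      rw [pvKb, PySem.Dict.contains_eq_isSome_get?, hg]
      rfl
    have hdrop : que.drop ind = que[ind] :: que.drop (ind + 1) := List.drop_eq_getElem_cons h
    have htake : que.take (ind + 1) = que.take ind ++ [que[ind]] :=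
      List.take_succ_eq_append_getElem h
    refine ih seen queue order (by omega) ?_ hcl hnd H I4 ?_ ?_
    · rw [hq, hdrop, pvQ, show (pvKb cg que[ind] && !(order.contains que[ind])) = false by
        simp [hkb]]
      simp only [Bool.false_eq_true, if_false]
    · intro x hx hk
      rw [htake] at hx
      rcases List.mem_append.1 hx with hx' | hx'
      · exact I5 x hx' hk
      · rw [List.mem_singleton.1 hx'] at hk
        exact absurd hk (by simp [hkb])
    · intro x hx
      rw [htake]
      exact List.mem_append_left _ (I7 x hx)
  | case1 clean vis que ind h vs hg p ih =>
    intro seen queue order h0 hq hcl hnd H I4 I5 I7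
    have hpe : p = (PySem.Set.update vis vs, que ++ pvNew vis vs) := pvAExpand_spec vs vis que
    have hkb : pvKb cg (que[ind]) = true := by
      rw [pvKb, PySem.Dict.contains_eq_isSome_get?, hg]
      rfl
    have hvv : pvV cg (que[ind]) = vs := by rw [pvV, hg]; rfl
    have hkeys : PySem.Dict.keys clean = order := by
      show clean.items.map (·.1) = order
      rw [hcl, List.map_map,
        show ((fun (x : String × List String) => x.1) ∘ fun n => (n, pvV cg n)) = id from rfl,
        List.map_id]
    have hdrop : que.drop ind = que[ind] :: que.drop (ind + 1) := List.drop_eq_getElem_cons h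
    have htake : que.take (ind + 1) = que.take ind ++ [que[ind]] :=
      List.take_succ_eq_append_getElem h
    by_cases hco : que[ind] ∈ order
    · -- duplicate entry: A re-processes que[ind] with no effect, B's queue skipped it
      have hcc : clean.contains que[ind] = true := by
        rw [Bool.eq_iff_iff, PySem.Dict.contains_iff_mem_keys, hkeys]
        simp [hco]
      have hclean' : (clean.insert que[ind] vs).items = order.map (fun n => (n, pvV cg n)) := by
        rw [PySem.Dict.items_insert_of_contains clean vs hcc, hcl, List.map_map]
        refine List.map_congr_left ?_
        intro n hn
        by_cases hne : n = que[ind]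
        · subst hne; simp [hvv]
        · simp [Function.comp, hne]
      have hsub : ∀ n ∈ vs, n ∈ vis := by
        intro n hn
        exact I4 que[ind] hco n (hvv ▸ hn)
      have hnew : pvNew vis vs = [] := pvNew_nil_of_subset vs vis hsub
      have hupd : PySem.Set.update vis vs = vis := pvUpdate_of_subset vs vis hsub
      have hp1 : p.1 = vis := by rw [hpe, hupd]
      have hp2 : p.2 = que := by rw [hpe, hnew]; simp
      rw [hp1, hp2] at ih ⊢
      refine ih seen queue order (by omega) ?_ hclean' hnd H I4 ?_ ?_
      · rw [hq, hdrop, pvQ, show (pvKb cg que[ind] && !(order.contains que[ind])) = false by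
          simp [hco]]
        try simp only [Bool.false_eq_true, if_false]
      · intro x hx hk
        rw [htake] at hx
        rcases List.mem_append.1 hx with hx' | hx'
        · exact I5 x hx' hk
        · rw [List.mem_singleton.1 hx']
          exact hco
      · intro x hx
        rw [htake]
        exact List.mem_append_left _ (I7 x hx)
    · -- fresh node: both sides emit que[ind]
      have hcc : clean.contains que[ind] = false := by
        rw [Bool.eq_false_iff]
        intro hc
        exact hco (hkeys ▸ (PySem.Dict.contains_iff_mem_keys _ _).1 hc)
      have hclean' : (clean.insert que[ind] vs).items
          = (order ++ [que[ind]]).map (fun n => (n, pvV cg n)) := by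
        rw [PySem.Dict.items_insert_of_not_contains clean vs hcc, hcl, List.map_append]
        simp [hvv]
      have hquq : queue = que[ind] :: pvQ cg (que.drop (ind + 1)) (order ++ [que[ind]]) := by
        rw [hq, hdrop, pvQ, show (pvKb cg que[ind] && !(order.contains que[ind])) = true by
          simp [hkb, hco]]
        simp only [if_true]
      rw [hquq, pvBLoop]
      have hbe : pvBExpand cg (seen, pvQ cg (que.drop (ind + 1)) (order ++ [que[ind]]))
            (((PySem.Dict.mk cg).get? que[ind]).getD [])
          = (PySem.Set.update seen (vs.filter (fun x => pvKb cg x)),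
             pvQ cg (que.drop (ind + 1)) (order ++ [que[ind]]) ++ pvBNew cg seen vs) := by
        rw [hg]
        exact pvBExpand_spec cg vs seen _
      rw [hbe]
      have hmemque : ∀ x, x ∈ que ↔ x ∈ que.take ind ∨ x = que[ind] ∨ x ∈ que.drop (ind + 1) := by
        intro x
        have hsplit : que = que.take ind ++ que[ind] :: que.drop (ind + 1) := by
          rw [← hdrop, List.take_append_drop]
        constructor
        · intro hx
          rw [hsplit] at hx
          simp only [List.mem_append, List.mem_cons] at hx
          exact hx
        · rintro (h1 | h1 | h1)
          · exact List.take_subset _ _ h1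
          · exact h1 ▸ List.getElem_mem h
          · exact List.drop_subset _ _ h1
      refine ih (PySem.Set.update seen (vs.filter (fun x => pvKb cg x)))
        (pvQ cg (que.drop (ind + 1)) (order ++ [que[ind]]) ++ pvBNew cg seen vs)
        (order ++ [que[ind]]) ?_ ?_ hclean' ?_ ?_ ?_ ?_ ?_
      · rw [hpe]
        simp only [List.length_append]
        omega
      · -- queue invariant is preserved
        rw [hpe]
        simp only
        rw [List.drop_append_of_le_length (by omega), pvQ_append]
        congr 1
        rw [pvQ_nodup_eq_filter cg (pvNew vis vs) _ (pvNew_nodup vs vis),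
          pvInner cg que vs vis seen H]
        refine List.filter_congr ?_
        intro x hx
        have hxm := pvNew_mem vs vis x hx
        by_cases hkx : pvKb cg x = true
        · have hiff : x ∈ que ↔ x ∈ order ++ [que[ind]]
              ++ pvQ cg (que.drop (ind + 1)) (order ++ [que[ind]]) := by
            constructor
            · intro hxq
              rcases (hmemque x).1 hxq with h' | h' | h'
              · exact List.mem_append_left _ (List.mem_append_left _ (I5 x h' hkx))
              · exact List.mem_append_left _ (List.mem_append_right _ (by simp [h']))
              · by_cases ho : x ∈ order ++ [que[ind]]
                · exact List.mem_append_left _ ho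
                · refine List.mem_append_right _ ((pvQ_mem cg _ _ x).2 ⟨h', hkx, ho⟩)
            · intro hxq
              rcases List.mem_append.1 hxq with h' | h'
              · rcases List.mem_append.1 h' with h'' | h''
                · exact (hmemque x).2 (Or.inl (I7 x h''))
                · exact (hmemque x).2 (Or.inr (Or.inl (by simpa using h'')))
              · have := ((pvQ_mem cg _ _ x).1 h').1
                exact (hmemque x).2 (Or.inr (Or.inr this))
          rw [Bool.eq_iff_iff]
          simp [hkx, hiff]
        · have hk2 := Bool.eq_false_iff.2 hkx
          simp [hk2]
      · rw [List.nodup_append]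
        refine ⟨hnd, List.nodup_singleton _, ?_⟩
        intro a ha b hb
        have hb' : b = que[ind] := by simpa using hb
        subst hb'
        exact fun he => hco (he ▸ ha)
      · -- seen invariant is preserved
        intro x
        rw [hpe]
        simp only
        rw [PySem.Set.mem_update, PySem.Set.mem_update, List.mem_filter, List.mem_append, H x]
        constructor
        · rintro (⟨hk, hv | hv⟩ | ⟨hv, hk⟩)
          · exact ⟨hk, Or.inl (Or.inl hv)⟩
          · exact ⟨hk, Or.inr (Or.inl hv)⟩
          · exact ⟨hk, Or.inl (Or.inr hv)⟩
        · rintro ⟨hk, (hv | hv) | (hv | hv)⟩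
          · exact Or.inl ⟨hk, Or.inl hv⟩
          · exact Or.inr ⟨hv, hk⟩
          · exact Or.inl ⟨hk, Or.inr hv⟩
          · exact Or.inr ⟨(pvNew_mem vs vis x hv).1, hk⟩
      · -- processed nodes have visited neighbours
        intro x hx n hn
        rw [hpe]
        rw [PySem.Set.mem_update]
        rcases List.mem_append.1 hx with hx' | hx'
        · exact Or.inl (I4 x hx' n hn)
        · rw [List.mem_singleton.1 hx', hvv] at hn
          exact Or.inr hn
      · intro x hx hk
        rw [hpe] at hx
        simp only at hx
        rw [List.take_append_of_le_length (by omega), htake] at hx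
        rcases List.mem_append.1 hx with hx' | hx'
        · exact List.mem_append_left _ (I5 x hx' hk)
        · exact List.mem_append_right _ hx'
      · intro x hx
        rw [hpe]
        simp only
        rw [List.take_append_of_le_length (by omega), htake]
        rcases List.mem_append.1 hx with hx' | hx'
        · exact List.mem_append_left _ (I7 x hx')
        · exact List.mem_append_right _ hx'

-- ===== VERDICT (by name: the statement is the Claim_ definition above) =====
theorem remove_unreachable_spec : Claim_equal_remove_unreachable := by
  unfold Claim_equal_remove_unreachable Spec_remove_unreachable
  intro sn cg _
  show (pvALoop cg PySem.Dict.empty PySem.Set.empty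
      (sn.filter (fun x => pvKb cg x)) 0).items
    = ((pvBLoop cg (pvBExpand cg (PySem.Set.empty, []) sn).1
        (pvBExpand cg (PySem.Set.empty, []) sn).2 []).foldl
        (fun d n => d.insert n (pvV cg n)) PySem.Dict.empty).items
  rw [pvBExpand_spec cg sn PySem.Set.empty []]
  simp only [List.nil_append]
  have hempty : ∀ x : String, ¬ x ∈ (PySem.Set.empty : PySem.Set String) := by
    intro x hx
    simp [PySem.Set.empty] at hx
  have hq0 : pvBNew cg PySem.Set.empty sn = pvQ cg ((sn.filter (fun x => pvKb cg x)).drop 0) [] := by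
    rw [List.drop_zero, pvQ_filter_K]
    refine pvBNew_eq_pvQ cg sn PySem.Set.empty [] ?_
    intro x
    simp
  have hmain := pvMain cg PySem.Dict.empty PySem.Set.empty (sn.filter (fun x => pvKb cg x)) 0
    (PySem.Set.update PySem.Set.empty (sn.filter (pvKb cg)))
    (pvBNew cg PySem.Set.empty sn) []
    (Nat.zero_le _) hq0 rfl List.nodup_nil
    (by
      intro x
      rw [PySem.Set.mem_update, List.mem_filter]
      constructor
      · rintro (hx | ⟨hx1, hx2⟩)
        · exact absurd hx (hempty x)
        · exact ⟨hx2, Or.inr ⟨hx1, hx2⟩⟩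
      · rintro ⟨hk, hx | hx⟩
        · exact absurd hx (hempty x)
        · exact Or.inr ⟨hx.1, hk⟩)
    (by intro x hx; simp at hx)
    (by intro x hx; simp at hx)
    (by intro x hx; simp at hx)
  rw [hmain]
  have hnodup : (pvBLoop cg (PySem.Set.update PySem.Set.empty (sn.filter (pvKb cg)))
      (pvBNew cg PySem.Set.empty sn) []).Nodup := by
    refine pvBLoop_nodup cg _ _ _ ?_ ?_
    · simpa using pvBNew_nodup cg sn PySem.Set.empty
    · intro x hx
      simp only [List.nil_append] at hx
      have := pvBNew_mem cg sn PySem.Set.empty x hx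
      exact (PySem.Set.mem_update _ _ _).2 (Or.inr (List.mem_filter.2 ⟨this.2.2, this.1⟩))
  have hff := PySem.Dict.items_foldl_insert_fresh
    (pvBLoop cg (PySem.Set.update PySem.Set.empty (sn.filter (pvKb cg)))
      (pvBNew cg PySem.Set.empty sn) [])
    (fun (a : String) => a) (fun n => pvV cg n) PySem.Dict.empty
    (by intro a _; rfl) (by simpa using hnodup)
  rw [hff]
  rfl
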